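-- pv_equiv track=rewrite | github.com/noxthot/google_codejam_2020_04 | Round_1A/E1.py | findCommonString
-- ===== SOURCE A (Python) =====
-- def findCommonString(N, Ps):
--     commonString = []
--
--     Is = [len(word) - 1 for word in Ps]
--
--     idxToWorkWith = list(range(N))
--
--     while len(idxToWorkWith) > 0:
--         delIdxs = []
--         letter = ''
--
--         for wordIdx in idxToWorkWith:
--             thisLetter = Ps[wordIdx][Is[wordIdx]]
--
--             if thisLetter == "*":
--                 delIdxs.append(wordIdx)
--             else:
--                 if letter == '':
--                     letter = thisLetter
--                 elif letter != thisLetter: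
--                     return "*"
--
--                 Is[wordIdx] -= 1
--
--                 if Is[wordIdx] < 0:
--                     delIdxs.append(wordIdx)
--
--         commonString.append(letter)
--
--         for delIdx in delIdxs:
--             idxToWorkWith.remove(delIdx)
--
--     commonString.reverse()
--
--     return "".join(commonString)
-- ===== SOURCE B (Python) =====
-- def findCommonString(N, Ps):
--     suffixes = [Ps[i].rsplit('*', 1)[-1] for i in range(N)]
--     best = max(suffixes, key=len, default='')
--     for s in suffixes:
--         if not best.endswith(s):
--             return '*'
--     return best
-- ===== Notes on version B (the rewrite author's own statement) =====
-- stated objective: simpler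
-- what changed: Replaces A's round-by-round column peeling over a mutable active-index set (per-round scans, letter agreement checks and list.remove bookkeeping) by a direct pass: take each pattern's suffix after its last '*' (rsplit), pick the longest, and check every suffix is a tail of it (endswith).
-- outside the precondition, e.g. on findCommonString(3, ['a', 'b', '']): A returns '*', B returns '*'; on findCommonString(3, ['a', 'b']): A returns '*', B raises IndexError
import Mathlib
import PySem

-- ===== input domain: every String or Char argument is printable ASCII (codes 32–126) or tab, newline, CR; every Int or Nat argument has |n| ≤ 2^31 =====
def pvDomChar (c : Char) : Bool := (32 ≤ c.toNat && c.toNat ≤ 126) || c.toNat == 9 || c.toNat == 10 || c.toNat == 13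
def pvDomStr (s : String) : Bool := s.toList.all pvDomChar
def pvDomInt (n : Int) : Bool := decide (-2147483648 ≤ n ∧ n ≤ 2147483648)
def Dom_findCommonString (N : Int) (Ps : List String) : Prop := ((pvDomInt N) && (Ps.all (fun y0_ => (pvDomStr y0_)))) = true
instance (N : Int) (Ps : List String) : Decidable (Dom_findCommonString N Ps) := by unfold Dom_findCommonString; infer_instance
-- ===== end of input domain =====

-- B replaces A's round-by-round column peeling over a mutable active-index set by a direct
-- build-suffixes / longest / tail-check pass (objective: simpler).

-- ===== PORT A =====
-- inner `for wordIdx in idxToWorkWith` loop; `none` = IndexError, `Sum.inl s` = `return s`,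
-- `Sum.inr (delIdxs, letter, Is)` = loop body finished normally.
def pvInnerA (Ps : List String) : List Int → List Int → String → List Int →
    Option (String ⊕ (List Int × String × List Int))
  | [], delIdxs, letter, Is => some (Sum.inr (delIdxs, letter, Is))
  | i :: rest, delIdxs, letter, Is =>
    match PySem.List.pyGet? Ps i with
    | none => none
    | some w =>
      match PySem.List.pyGet? Is i with
      | none => none
      | some v =>
        match PySem.Str.pyGet? w v with      -- thisLetter = Ps[wordIdx][Is[wordIdx]]
        | none => none
        | some c =>
          if c = '*' then pvInnerA Ps rest (delIdxs ++ [i]) letter Is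
          else if letter ≠ "" ∧ letter ≠ String.ofList [c] then some (Sum.inl "*")
          else
            let letter' := if letter = "" then String.ofList [c] else letter
            match PySem.List.pySet? Is i (v - 1) with   -- Is[wordIdx] -= 1
            | none => none
            | some Is' =>
              pvInnerA Ps rest (if v - 1 < 0 then delIdxs ++ [i] else delIdxs) letter' Is'

-- `for delIdx in delIdxs: idxToWorkWith.remove(delIdx)`; none = ValueError
def pvRemoveAll : List Int → List Int → Option (List Int)
  | [], act => some act
  | d :: ds, act =>
    match PySem.List.remove? act d with
    | none => none
    | some act' => pvRemoveAll ds act'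

-- the `while len(idxToWorkWith) > 0` loop; fuel is a totality device only (proved sufficient under Pre_)
def pvOuterA (Ps : List String) : Nat → List Int → List Int → List String → Option String
  | 0, _, _, _ => none
  | fuel+1, act, Is, common =>
    if act = [] then some (PySem.Str.join "" common.reverse)
    else
      match pvInnerA Ps act [] "" Is with
      | none => none
      | some (Sum.inl s) => some s
      | some (Sum.inr (delIdxs, letter, Is')) =>
        match pvRemoveAll delIdxs act with
        | none => none
        | some act' => pvOuterA Ps fuel act' Is' (common ++ [letter])

def findCommonString (N : Int) (Ps : List String) : String :=
  let Is := Ps.map (fun w => PySem.Str.len w - 1)          -- Is = [len(word) - 1 for word in Ps]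
  let fuel := (Ps.map (fun w => w.toList.length)).sum + 2
  (pvOuterA Ps fuel (PySem.List.pyRange 0 N 1) Is []).getD ""

-- ===== PORT B =====
-- s.rsplit('*', 1)[-1] : the segment after the last '*' (the whole string if there is no '*'); exact hand port
def pvSuffix (cs : List Char) : List Char := (cs.reverse.takeWhile (fun c => c ≠ '*')).reverse

def findCommonString_alt (N : Int) (Ps : List String) : String :=
  let suffixes := (PySem.List.pyRange 0 N 1).map
      (fun i => String.ofList (pvSuffix ((PySem.List.pyGet? Ps i).getD "").toList))
  let best := PySem.List.maxD suffixes PySem.Str.len ""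
  if suffixes.all (fun s => PySem.Str.endswith best s) then best else "*"

-- ===== PRECONDITION & SPEC =====
-- Pre_ excludes N > len(Ps) (A raises IndexError on Is[wordIdx]; B raises IndexError on Ps[i])
-- and any empty pattern among the first N (A indexes word[-1] on the empty word: it raises
-- IndexError, except when an earlier last-letter conflict already returned "*").
def Pre_findCommonString (N : Int) (Ps : List String) : Prop :=
  N ≤ PySem.List.len Ps ∧ ∀ s ∈ Ps.take N.toNat, s ≠ ""
instance (N : Int) (Ps : List String) : Decidable (Pre_findCommonString N Ps) := by
  unfold Pre_findCommonString; infer_instance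

def pvWitness_findCommonString : Int × List String := (2, ["ab", "b"])

def Spec_findCommonString (N : Int) (Ps : List String) (out : String) : Prop := out = findCommonString_alt N Ps
instance (N : Int) (Ps : List String) (out : String) : Decidable (Spec_findCommonString N Ps out) := by unfold Spec_findCommonString; infer_instance

-- ===== CLAIM (what is proved, stated in full; the proofs are below) =====
def Claim_equal_findCommonString : Prop := ∀ (N : Int) (Ps : List String), Dom_findCommonString N Ps → Pre_findCommonString N Ps → Spec_findCommonString N Ps (findCommonString N Ps)

-- ===== LEMMAS AND PROOFS =====

-- ghost state abstraction for A's loop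
def pvRem (Ps : List String) (Is : List Int) (i : Int) : List Char :=
  ((Ps.getD i.toNat "").toList).take ((Is.getD i.toNat 0).toNat + 1)

def pvLC (Ps : List String) (Is : List Int) (i : Int) : Char := (pvRem Ps Is i).getLastD ' '

def pvDelP (Ps : List String) (Is : List Int) (i : Int) : Bool :=
  (pvLC Ps Is i == '*') || (Is.getD i.toNat 0 == 0)

def pvGood (Ps : List String) (Is : List Int) (i : Int) : Prop :=
  0 ≤ i ∧ i.toNat < Ps.length ∧ i.toNat < Is.length ∧ 0 ≤ Is.getD i.toNat 0 ∧
    (Is.getD i.toNat 0).toNat < (Ps.getD i.toNat "").toList.length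

-- letter bookkeeping of one round, on the list of last characters
def pvScan : List Char → Option Char → Option (Option Char)
  | [], l => some l
  | c :: cs, l =>
    if c = '*' then pvScan cs l
    else
      match l with
      | none => pvScan cs (some c)
      | some l₀ => if c = l₀ then pvScan cs (some l₀) else none

def pvStrOf : Option Char → String
  | none => ""
  | some c => String.ofList [c]

def pvLongest (us : List (List Char)) : List Char :=
  us.foldl (fun b u => if b.length < u.length then u else b) []

def pvCompat (us : List (List Char)) : Prop := ∀ u ∈ us, ∀ v ∈ us, u <:+ v ∨ v <:+ u

-- abstract value of B on the list of remaining pattern fragments (none ≅ "*")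
def pvBVal (ts : List (List Char)) : Option (List Char) :=
  let us := ts.map pvSuffix
  if ∀ u ∈ us, ∀ v ∈ us, u <:+ v ∨ v <:+ u then some (pvLongest us) else none

def pvMeasure (Ps : List String) (Is : List Int) (act : List Int) : Nat :=
  (act.map (fun i => (pvRem Ps Is i).length)).sum

-- ---- suffix-order toolbox ----
lemma pv_suffix_concat (u v : List Char) (c : Char) : u ++ [c] <:+ v ++ [c] ↔ u <:+ v := by
  constructor
  · rintro ⟨w, hw⟩
    rw [← List.append_assoc] at hw
    have h2 := congrArg List.dropLast hw
    simp only [List.dropLast_concat] at h2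
    exact ⟨w, h2⟩
  · rintro ⟨w, hw⟩
    exact ⟨w, by rw [← List.append_assoc, hw]⟩

lemma pv_singleton_suffix (v : List Char) (c : Char) (h : v.getLast? = some c) : [c] <:+ v := by
  have hne : v ≠ [] := by rintro rfl; simp at h
  refine ⟨v.dropLast, ?_⟩
  have h3 : v.getLast hne = c := by
    rw [List.getLast?_eq_some_getLast hne] at h
    exact Option.some_inj.mp h
  rw [← h3]
  exact List.dropLast_concat_getLast hne

lemma pv_suffix_last (u v : List Char) (h : u <:+ v) (hu : u ≠ []) : u.getLast? = v.getLast? := by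
  obtain ⟨w, hw⟩ := h
  rw [← hw, List.getLast?_append_of_ne_nil w hu]

lemma pv_suffix_total (u v w : List Char) (hu : u <:+ w) (hv : v <:+ w) : u <:+ v ∨ v <:+ u :=
  List.suffix_or_suffix_of_suffix hu hv

-- ---- pvSuffix lemmas ----
lemma pvSuffix_of_star (t : List Char) (h : t.getLastD ' ' = '*') (hne : t ≠ []) :
    pvSuffix t = [] := by
  have hr : t.reverse ≠ [] := by simpa using hne
  obtain ⟨a, r, har⟩ := List.exists_cons_of_ne_nil hr
  have ht : t = r.reverse ++ [a] := by rw [← List.reverse_reverse t, har]; simp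
  have ha : a = '*' := by rw [ht] at h; simpa using h
  rw [pvSuffix, har, ha]
  simp

lemma pvSuffix_last (t : List Char) (hne : t ≠ []) (h : t.getLastD ' ' ≠ '*') :
    pvSuffix t ≠ [] ∧ (pvSuffix t).getLast? = t.getLast? := by
  have hr : t.reverse ≠ [] := by simpa using hne
  obtain ⟨a, r, har⟩ := List.exists_cons_of_ne_nil hr
  have ht : t = r.reverse ++ [a] := by rw [← List.reverse_reverse t, har]; simp
  have ha : a ≠ '*' := by rw [ht] at h; simpa using h
  have hsfx : pvSuffix t = (r.takeWhile (fun c => c ≠ '*')).reverse ++ [a] := by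
    rw [pvSuffix, har]
    simp [ha]
  constructor
  · rw [hsfx]; simp
  · rw [hsfx, ht]
    simp

lemma pvSuffix_dropLast (t : List Char) (hne : t ≠ []) (h : t.getLastD ' ' ≠ '*') :
    pvSuffix (t.dropLast) = (pvSuffix t).dropLast := by
  have hr : t.reverse ≠ [] := by simpa using hne
  obtain ⟨a, r, har⟩ := List.exists_cons_of_ne_nil hr
  have ht : t = r.reverse ++ [a] := by rw [← List.reverse_reverse t, har]; simp
  have ha : a ≠ '*' := by rw [ht] at h; simpa using h
  have hd : t.dropLast = r.reverse := by rw [ht, List.dropLast_concat]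
  have hsfx : pvSuffix t = (r.takeWhile (fun c => c ≠ '*')).reverse ++ [a] := by
    rw [pvSuffix, har]
    simp [ha]
  rw [hd, hsfx, List.dropLast_concat, pvSuffix, List.reverse_reverse]

-- ---- pvLongest lemmas ----
lemma pv_fold_mem (us : List (List Char)) : ∀ b : List Char,
    us.foldl (fun b u => if b.length < u.length then u else b) b ∈ us ∨
    us.foldl (fun b u => if b.length < u.length then u else b) b = b := by
  induction us with
  | nil => intro b; right; rfl
  | cons a t ih =>
    intro b
    simp only [List.foldl_cons]
    rcases ih (if b.length < a.length then a else b) with h | h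
    · left; exact List.mem_cons_of_mem _ h
    · by_cases hab : b.length < a.length
      · left; rw [h]; simp [hab]
      · right; rw [h]; simp [hab]

lemma pv_fold_le_init (us : List (List Char)) : ∀ b : List Char,
    b.length ≤ (us.foldl (fun b u => if b.length < u.length then u else b) b).length := by
  induction us with
  | nil => intro b; simp
  | cons a t ih =>
    intro b
    simp only [List.foldl_cons]
    refine le_trans ?_ (ih _)
    split <;> omega

lemma pv_fold_le (us : List (List Char)) : ∀ b : List Char, ∀ u ∈ us,
    u.length ≤ (us.foldl (fun b u => if b.length < u.length then u else b) b).length := by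
  induction us with
  | nil => intro b u hu; simp at hu
  | cons a t ih =>
    intro b u hu
    simp only [List.foldl_cons]
    rcases List.mem_cons.mp hu with rfl | hu
    · refine le_trans ?_ (pv_fold_le_init t _)
      split <;> omega
    · exact ih _ u hu

lemma pvLongest_mem (us : List (List Char)) : pvLongest us ∈ us ∨ pvLongest us = [] :=
  pv_fold_mem us []

lemma pvLongest_le (us : List (List Char)) : ∀ u ∈ us, u.length ≤ (pvLongest us).length :=
  pv_fold_le us []

lemma pvLongest_eq (us : List (List Char)) (m : List Char) (hc : pvCompat us) (hm : m ∈ us)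
    (hmax : ∀ u ∈ us, u.length ≤ m.length) : pvLongest us = m := by
  rcases pvLongest_mem us with hL | hL
  · have h1 : (pvLongest us).length ≤ m.length := hmax _ hL
    have h2 : m.length ≤ (pvLongest us).length := pvLongest_le us m hm
    rcases hc _ hL _ hm with h | h
    · exact List.IsSuffix.eq_of_length h (by omega)
    · exact (List.IsSuffix.eq_of_length h (by omega)).symm
  · have h2 : m.length ≤ (pvLongest us).length := pvLongest_le us m hm
    rw [hL] at h2 ⊢
    have hm0 : m = [] := List.length_eq_zero_iff.mp (by simpa using h2)
    rw [hm0]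

lemma pvCompat_iff_allSuffix (us : List (List Char)) :
    pvCompat us ↔ ∀ u ∈ us, u <:+ pvLongest us := by
  constructor
  · intro hc u hu
    rcases pvLongest_mem us with hL | hL
    · rcases hc _ hu _ hL with h | h
      · exact h
      · have h1 : (pvLongest us).length ≤ u.length := List.IsSuffix.length_le h
        have h2 : u.length ≤ (pvLongest us).length := pvLongest_le us u hu
        have he := List.IsSuffix.eq_of_length h (by omega)
        rw [he]
    · have h2 : u.length ≤ (pvLongest us).length := pvLongest_le us u hu
      rw [hL] at h2 ⊢
      have : u = [] := List.length_eq_zero_iff.mp (by simpa using h2)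
      simp [this]
  · intro h u hu v hv
    exact pv_suffix_total u v _ (h u hu) (h v hv)

-- maxD with key len is the first-longest fold
lemma pv_maxD_aux (ss : List String) : ∀ (accO : Option String) (accL : List Char),
    (accO.map String.toList).getD [] = accL →
    ((ss.foldl (fun acc x => match acc with
        | none => some x
        | some m => if PySem.Str.len m < PySem.Str.len x then some x else some m) accO).getD "").toList
      = (ss.map String.toList).foldl (fun b u => if b.length < u.length then u else b) accL := by
  induction ss with
  | nil =>
    intro accO accL h
    cases accO <;> simpa using h
  | cons x t ih =>
    intro accO accL h
    simp only [List.foldl_cons, List.map_cons]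
    cases accO with
    | none =>
      simp only [Option.map_none, Option.getD_none] at h
      subst h
      refine ih (some x) _ ?_
      simp only [Option.map_some, Option.getD_some, List.length_nil]
      by_cases hx : 0 < x.toList.length
      · simp [hx]
      · have hx0 : x.toList = [] := List.length_eq_zero_iff.mp (by omega)
        simp [hx, hx0]
      
    | some m =>
      simp only [Option.map_some, Option.getD_some] at h
      subst h
      have hiff : (PySem.Str.len m < PySem.Str.len x) ↔ (m.toList.length < x.toList.length) := by
        simp only [PySem.Str.len]
        exact_mod_cast Iff.rfl
      have hstep : (match some m with
            | none => some x
            | some m => if PySem.Str.len m < PySem.Str.len x then some x else some m)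
          = if PySem.Str.len m < PySem.Str.len x then some x else some m := rfl
      rw [hstep]
      by_cases hlt : m.toList.length < x.toList.length
      · rw [if_pos (hiff.mpr hlt), if_pos hlt]
        exact ih (some x) _ rfl
      · rw [if_neg (fun hh => hlt (hiff.mp hh)), if_neg hlt]
        exact ih (some m) _ rfl


lemma pv_maxD_toList (ss : List String) :
    (PySem.List.maxD ss PySem.Str.len "").toList = pvLongest (ss.map String.toList) := by
  have hfold : (List.foldl
      (fun acc x =>
        match acc with
        | none => some x
        | some m => if PySem.Str.len m < PySem.Str.len x then some x else some m)
      none ss) = PySem.List.max? ss PySem.Str.len := by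
    rw [PySem.List.max?]
    congr 1
    funext acc x
    cases acc <;> rfl
  rw [PySem.List.maxD, pvLongest, ← hfold]
  exact pv_maxD_aux ss none [] rfl

-- ---- pvScan lemmas ----
lemma pvScan_some_some (cs : List Char) (c : Char) (l' : Option Char)
    (h : pvScan cs (some c) = some l') : l' = some c ∧ ∀ d ∈ cs, d = '*' ∨ d = c := by
  induction cs with
  | nil =>
    simp only [pvScan, Option.some_inj] at h
    exact ⟨h.symm, by simp⟩
  | cons d t ih =>
    simp only [pvScan] at h
    by_cases hd : d = '*'
    · rw [if_pos hd] at h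
      obtain ⟨h1, h2⟩ := ih h
      refine ⟨h1, ?_⟩
      intro e he
      rcases List.mem_cons.mp he with rfl | he
      · exact Or.inl hd
      · exact h2 e he
    · rw [if_neg hd] at h
      by_cases hdc : d = c
      · rw [if_pos hdc] at h
        obtain ⟨h1, h2⟩ := ih h
        refine ⟨h1, ?_⟩
        intro e he
        rcases List.mem_cons.mp he with rfl | he
        · exact Or.inr hdc
        · exact h2 e he
      · rw [if_neg hdc] at h
        cases h

lemma pvScan_none_some (cs : List Char) (l' : Option Char) (h : pvScan cs none = some l') :
    (l' = none ∧ ∀ d ∈ cs, d = '*') ∨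
    (∃ c, l' = some c ∧ c ≠ '*' ∧ c ∈ cs ∧ ∀ d ∈ cs, d = '*' ∨ d = c) := by
  induction cs with
  | nil =>
    simp only [pvScan, Option.some_inj] at h
    exact Or.inl ⟨h.symm, by simp⟩
  | cons d t ih =>
    simp only [pvScan] at h
    by_cases hd : d = '*'
    · rw [if_pos hd] at h
      rcases ih h with ⟨h1, h2⟩ | ⟨c, h1, h2, h3, h4⟩
      · refine Or.inl ⟨h1, ?_⟩
        intro e he
        rcases List.mem_cons.mp he with rfl | he
        · exact hd
        · exact h2 e he
      · refine Or.inr ⟨c, h1, h2, List.mem_cons_of_mem _ h3, ?_⟩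
        intro e he
        rcases List.mem_cons.mp he with rfl | he
        · exact Or.inl hd
        · exact h4 e he
    · rw [if_neg hd] at h
      obtain ⟨h1, h2⟩ := pvScan_some_some t d l' h
      refine Or.inr ⟨d, h1, hd, List.mem_cons_self, ?_⟩
      intro e he
      rcases List.mem_cons.mp he with rfl | he
      · exact Or.inr rfl
      · exact h2 e he

lemma pvScan_some_none (cs : List Char) (c : Char) (h : pvScan cs (some c) = none) :
    ∃ d ∈ cs, d ≠ '*' ∧ d ≠ c := by
  induction cs with
  | nil => simp [pvScan] at h
  | cons d t ih =>
    simp only [pvScan] at h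
    by_cases hd : d = '*'
    · rw [if_pos hd] at h
      obtain ⟨e, he, p1, p2⟩ := ih h
      exact ⟨e, List.mem_cons_of_mem _ he, p1, p2⟩
    · rw [if_neg hd] at h
      by_cases hdc : d = c
      · rw [if_pos hdc] at h
        obtain ⟨e, he, p1, p2⟩ := ih h
        exact ⟨e, List.mem_cons_of_mem _ he, p1, p2⟩
      · exact ⟨d, List.mem_cons_self, hd, hdc⟩

lemma pvScan_none_none (cs : List Char) (h : pvScan cs none = none) :
    ∃ c ∈ cs, ∃ d ∈ cs, c ≠ '*' ∧ d ≠ '*' ∧ c ≠ d := by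
  induction cs with
  | nil => simp [pvScan] at h
  | cons d t ih =>
    simp only [pvScan] at h
    by_cases hd : d = '*'
    · rw [if_pos hd] at h
      obtain ⟨a, ha, b, hb, p1, p2, p3⟩ := ih h
      exact ⟨a, List.mem_cons_of_mem _ ha, b, List.mem_cons_of_mem _ hb, p1, p2, p3⟩
    · rw [if_neg hd] at h
      obtain ⟨e, he, p1, p2⟩ := pvScan_some_none t d h
      exact ⟨d, List.mem_cons_self, e, List.mem_cons_of_mem _ he, hd, p1, Ne.symm p2⟩

lemma pvBVal_pos (ts : List (List Char)) (h : pvCompat (ts.map pvSuffix)) :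
    pvBVal ts = some (pvLongest (ts.map pvSuffix)) := by
  simp only [pvBVal]
  exact if_pos h

lemma pvBVal_neg (ts : List (List Char)) (h : ¬ pvCompat (ts.map pvSuffix)) :
    pvBVal ts = none := by
  simp only [pvBVal]
  exact if_neg h

-- ---- round mathematics at the fragment level ----
lemma pvBVal_conflict (ts : List (List Char)) (t₁ t₂ : List Char)
    (h₁ : t₁ ∈ ts) (h₂ : t₂ ∈ ts) (hne : ∀ t ∈ ts, t ≠ [])
    (hs₁ : t₁.getLastD ' ' ≠ '*') (hs₂ : t₂.getLastD ' ' ≠ '*')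
    (hd : t₁.getLastD ' ' ≠ t₂.getLastD ' ') : pvBVal ts = none := by
  have hnc : ¬ pvCompat (ts.map pvSuffix) := by
    intro hc
    have hu₁ : pvSuffix t₁ ∈ ts.map pvSuffix := List.mem_map_of_mem h₁
    have hu₂ : pvSuffix t₂ ∈ ts.map pvSuffix := List.mem_map_of_mem h₂
    have p₁ := pvSuffix_last t₁ (hne _ h₁) hs₁
    have p₂ := pvSuffix_last t₂ (hne _ h₂) hs₂
    have key : t₁.getLast? = t₂.getLast? := by
      rcases hc _ hu₁ _ hu₂ with h | h
      · rw [← p₁.2, ← p₂.2, pv_suffix_last _ _ h p₁.1]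
      · rw [← p₁.2, ← p₂.2, pv_suffix_last _ _ h p₂.1]
    exact hd (by rw [List.getLastD_eq_getLast?, List.getLastD_eq_getLast?, key])
  exact pvBVal_neg ts hnc

lemma pvBVal_allstar (ts : List (List Char)) (hne : ∀ t ∈ ts, t ≠ [])
    (h : ∀ t ∈ ts, t.getLastD ' ' = '*') : pvBVal ts = some [] := by
  have hus : ∀ u ∈ ts.map pvSuffix, u = [] := by
    intro u hu
    obtain ⟨t, ht, rfl⟩ := List.mem_map.mp hu
    exact pvSuffix_of_star t (h t ht) (hne t ht)
  have hcomp : pvCompat (ts.map pvSuffix) := by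
    intro u hu v hv
    rw [hus u hu, hus v hv]
    exact Or.inl (List.suffix_refl [])
  rw [pvBVal_pos ts hcomp]
  congr 1
  rcases pvLongest_mem (ts.map pvSuffix) with hL | hL
  · exact hus _ hL
  · exact hL

lemma pvBVal_round (ts : List (List Char)) (c : Char) (hcs : c ≠ '*')
    (hne : ∀ t ∈ ts, t ≠ [])
    (hc : ∀ t ∈ ts, t.getLastD ' ' = '*' ∨ t.getLastD ' ' = c)
    (hex : ∃ t ∈ ts, t.getLastD ' ' ≠ '*') :
    pvBVal ts =
      (pvBVal ((ts.filter (fun t => !((t.getLastD ' ' == '*') || (t.length == 1)))).map List.dropLast)).map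
        (· ++ [c]) := by
  set ts' := (ts.filter (fun t => !((t.getLastD ' ' == '*') || (t.length == 1)))).map List.dropLast with hts'
  have hlast? : ∀ t ∈ ts, t.getLastD ' ' ≠ '*' → t.getLast? = some c := by
    intro t ht hst
    rcases hc t ht with h | h
    · exact absurd h hst
    have hne' := hne t ht
    cases hgl : t.getLast? with
    | none => exact absurd (List.getLast?_eq_none_iff.mp hgl) hne'
    | some e =>
      rw [List.getLastD_eq_getLast?, hgl] at h
      simp only [Option.getD_some] at h
      rw [h]
  have hueq : ∀ t ∈ ts, t.getLastD ' ' ≠ '*' → pvSuffix t = (pvSuffix t).dropLast ++ [c] := by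
    intro t ht hnstar
    have hsl := pvSuffix_last t (hne t ht) hnstar
    have h1 : (pvSuffix t).getLast? = some c := by rw [hsl.2]; exact hlast? t ht hnstar
    have h2 := List.dropLast_concat_getLast hsl.1
    rw [List.getLast?_eq_some_getLast hsl.1, Option.some_inj] at h1
    rw [← h1]
    exact h2.symm
  have W1 : ∀ u' ∈ ts'.map pvSuffix, u' ++ [c] ∈ ts.map pvSuffix := by
    intro u' hu'
    obtain ⟨t', ht', rfl⟩ := List.mem_map.mp hu'
    obtain ⟨t, htf, rfl⟩ := List.mem_map.mp ht'
    have htmem := (List.mem_filter.mp htf).1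
    have hq := (List.mem_filter.mp htf).2
    simp only [Bool.not_or, Bool.and_eq_true, Bool.not_eq_eq_eq_not, Bool.not_true,
      beq_eq_false_iff_ne, ne_eq] at hq
    have hnstar : t.getLastD ' ' ≠ '*' := hq.1
    rw [pvSuffix_dropLast t (hne t htmem) hnstar, ← hueq t htmem hnstar]
    exact List.mem_map_of_mem htmem
  have W2 : ∀ u ∈ ts.map pvSuffix, u ≠ [] →
      (u.dropLast ∈ ts'.map pvSuffix ∨ u.dropLast = []) ∧ u = u.dropLast ++ [c] := by
    intro u hu hune
    obtain ⟨t, ht, rfl⟩ := List.mem_map.mp hu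
    have hnstar : t.getLastD ' ' ≠ '*' := by
      intro hst
      exact hune (pvSuffix_of_star t hst (hne t ht))
    refine ⟨?_, hueq t ht hnstar⟩
    by_cases hl1 : t.length = 1
    · right
      have hsl := pvSuffix_last t (hne t ht) hnstar
      have hlen : (pvSuffix t).length ≤ 1 := by
        have := (List.takeWhile_prefix (l := t.reverse) (p := fun c => c ≠ '*')).length_le
        rw [pvSuffix]
        simpa [hl1] using this
      have : (pvSuffix t).dropLast.length = 0 := by
        rw [List.length_dropLast]
        omega
      exact List.length_eq_zero_iff.mp this
    · left
      have htf : t ∈ ts.filter (fun t => !((t.getLastD ' ' == '*') || (t.length == 1))) := by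
        rw [List.mem_filter]
        refine ⟨ht, ?_⟩
        simp only [Bool.not_or, Bool.and_eq_true, Bool.not_eq_eq_eq_not, Bool.not_true,
          beq_eq_false_iff_ne, ne_eq]
        exact ⟨hnstar, hl1⟩
      rw [← pvSuffix_dropLast t (hne t ht) hnstar]
      exact List.mem_map_of_mem (List.mem_map_of_mem htf)
  have hcompiff : pvCompat (ts.map pvSuffix) ↔ pvCompat (ts'.map pvSuffix) := by
    constructor
    · intro hcp u' hu' v' hv'
      rcases hcp _ (W1 u' hu') _ (W1 v' hv') with h | h
      · exact Or.inl ((pv_suffix_concat _ _ c).mp h)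
      · exact Or.inr ((pv_suffix_concat _ _ c).mp h)
    · intro hcp u hu v hv
      by_cases hu0 : u = []
      · exact Or.inl (by rw [hu0]; exact List.nil_suffix)
      by_cases hv0 : v = []
      · exact Or.inr (by rw [hv0]; exact List.nil_suffix)
      obtain ⟨hdu, hu_eq⟩ := W2 u hu hu0
      obtain ⟨hdv, hv_eq⟩ := W2 v hv hv0
      rcases hdu with hdu | hdu
      · rcases hdv with hdv | hdv
        · rcases hcp _ hdu _ hdv with h | h
          · exact Or.inl (by rw [hu_eq, hv_eq]; exact (pv_suffix_concat _ _ c).mpr h)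
          · exact Or.inr (by rw [hu_eq, hv_eq]; exact (pv_suffix_concat _ _ c).mpr h)
        · refine Or.inr ?_
          have : v = [c] := by rw [hv_eq, hdv]; simp
          rw [this]
          exact pv_singleton_suffix u c (by rw [hu_eq]; exact List.getLast?_concat)
      · refine Or.inl ?_
        have : u = [c] := by rw [hu_eq, hdu]; simp
        rw [this]
        exact pv_singleton_suffix v c (by rw [hv_eq]; exact List.getLast?_concat)
  by_cases hcp : pvCompat (ts.map pvSuffix)
  · have hcp' := hcompiff.mp hcp
    have hmem : pvLongest (ts'.map pvSuffix) ++ [c] ∈ ts.map pvSuffix := by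
      rcases pvLongest_mem (ts'.map pvSuffix) with hL | hL
      · exact W1 _ hL
      · rw [hL, List.nil_append]
        obtain ⟨t, ht, hts⟩ := hex
        have hsl := pvSuffix_last t (hne t ht) hts
        have hu : pvSuffix t ∈ ts.map pvSuffix := List.mem_map_of_mem ht
        obtain ⟨hdu, hueq'⟩ := W2 _ hu hsl.1
        have hd0 : (pvSuffix t).dropLast = [] := by
          rcases hdu with hdu | hdu
          · have hle := pvLongest_le (ts'.map pvSuffix) _ hdu
            rw [hL] at hle
            exact List.length_eq_zero_iff.mp (by simpa using hle)
          · exact hdu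
        rw [hd0, List.nil_append] at hueq'
        rw [← hueq']
        exact hu
    have hmax : ∀ u ∈ ts.map pvSuffix, u.length ≤ (pvLongest (ts'.map pvSuffix) ++ [c]).length := by
      intro u hu
      by_cases hu0 : u = []
      · simp [hu0]
      obtain ⟨hdu, hueq'⟩ := W2 u hu hu0
      have hle : u.dropLast.length ≤ (pvLongest (ts'.map pvSuffix)).length := by
        rcases hdu with hdu | hdu
        · exact pvLongest_le _ _ hdu
        · simp [hdu]
      rw [hueq']
      simp only [List.length_append, List.length_cons, List.length_nil]
      omega
    have hLeq : pvLongest (ts.map pvSuffix) = pvLongest (ts'.map pvSuffix) ++ [c] :=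
      pvLongest_eq _ _ hcp hmem hmax
    rw [pvBVal_pos ts hcp, pvBVal_pos ts' hcp', hLeq, Option.map_some]
  · have hcp' : ¬ pvCompat (ts'.map pvSuffix) := fun h => hcp (hcompiff.mpr h)
    rw [pvBVal_neg ts hcp, pvBVal_neg ts' hcp', Option.map_none]

-- ---- removal of the collected indices ----
lemma pvRemoveAll_not_mem (dl : List Int) (i : Int) (as : List Int) (h : i ∉ dl) :
    pvRemoveAll dl (i :: as) = (pvRemoveAll dl as).map (i :: ·) := by
  induction dl generalizing as with
  | nil => rfl
  | cons d ds ih =>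
    have hdi : i ≠ d := fun hh => h (hh ▸ List.mem_cons_self)
    simp only [pvRemoveAll, PySem.List.remove?_cons_of_ne as hdi]
    cases hr : PySem.List.remove? as d with
    | none => simp [hr]
    | some as' =>
      simp only [hr, Option.map_some]
      exact ih as' (fun hh => h (List.mem_cons_of_mem _ hh))

lemma pvRemoveAll_filter (act : List Int) (p : Int → Bool) (h : act.Nodup) :
    pvRemoveAll (act.filter p) act = some (act.filter (fun i => !(p i))) := by
  induction act with
  | nil => rfl
  | cons a t ih =>
    have hna : a ∉ t := (List.nodup_cons.mp h).1
    have hnd : t.Nodup := (List.nodup_cons.mp h).2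
    by_cases hpa : p a
    · rw [List.filter_cons_of_pos hpa]
      simp only [pvRemoveAll, PySem.List.remove?_cons_self]
      rw [ih hnd]
      simp [List.filter_cons, hpa]
    · rw [List.filter_cons_of_neg (by simpa using hpa)]
      have hnm : a ∉ t.filter p := fun hh => hna (List.mem_of_mem_filter hh)
      rw [pvRemoveAll_not_mem _ _ _ hnm, ih hnd]
      simp [List.filter_cons, hpa]

-- ---- small facts about the ghost state ----
lemma pv_pyGetD {α : Type} (xs : List α) (d : α) (i : Int) (h0 : 0 ≤ i)
    (h : i.toNat < xs.length) : PySem.List.pyGet? xs i = some (xs.getD i.toNat d) := by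
  rw [PySem.List.pyGet?_of_nonneg xs h0]
  simp [List.getElem?_eq_getElem h, List.getD_eq_getElem?_getD]

lemma pv_pySet (Is : List Int) (i x : Int) (h0 : 0 ≤ i) (h : i.toNat < Is.length) :
    PySem.List.pySet? Is i x = some (Is.set i.toNat x) := by
  have hlt : i < (Is.length : Int) := by omega
  simp [PySem.List.pySet?, PySem.List.pyIdx?, h0, hlt]

lemma pv_strGet (w : String) (v : Int) (h0 : 0 ≤ v) (h : v.toNat < w.toList.length) :
    PySem.Str.pyGet? w v = some (w.toList[v.toNat]'h) := by
  rw [PySem.Str.pyGet?, PySem.Chars.pyGet?, PySem.List.pyGet?_of_nonneg _ h0]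
  simp [List.getElem?_eq_getElem h]

lemma pv_getD_set_self (l : List Int) (k : Nat) (x : Int) (h : k < l.length) :
    (l.set k x).getD k 0 = x := by
  simp [List.getD_eq_getElem?_getD, h]

lemma pv_getD_set_ne (l : List Int) (k : Nat) (x : Int) (m : Nat) (h : m ≠ k) :
    (l.set k x).getD m 0 = l.getD m 0 := by
  simp [List.getD_eq_getElem?_getD, List.getElem?_set_ne (Ne.symm h)]

lemma pvRem_congr (Ps : List String) (Is Is' : List Int) (i : Int)
    (h : Is'.getD i.toNat 0 = Is.getD i.toNat 0) : pvRem Ps Is' i = pvRem Ps Is i := by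
  rw [pvRem, pvRem, h]

lemma pvLC_congr (Ps : List String) (Is Is' : List Int) (i : Int)
    (h : Is'.getD i.toNat 0 = Is.getD i.toNat 0) : pvLC Ps Is' i = pvLC Ps Is i := by
  rw [pvLC, pvLC, pvRem_congr Ps Is Is' i h]

lemma pvDelP_congr (Ps : List String) (Is Is' : List Int) (i : Int)
    (h : Is'.getD i.toNat 0 = Is.getD i.toNat 0) : pvDelP Ps Is' i = pvDelP Ps Is i := by
  rw [pvDelP, pvDelP, pvLC_congr Ps Is Is' i h, h]

lemma pvGood_congr (Ps : List String) (Is Is' : List Int) (i : Int)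
    (h : Is'.getD i.toNat 0 = Is.getD i.toNat 0) (hlen : Is'.length = Is.length)
    (hgood : pvGood Ps Is i) : pvGood Ps Is' i := by
  obtain ⟨a, b, c, d, e⟩ := hgood
  exact ⟨a, b, by omega, by rw [h]; exact d, by rw [h]; exact e⟩

lemma pvRem_ne_nil (Ps : List String) (Is : List Int) (i : Int) (hg : pvGood Ps Is i) :
    pvRem Ps Is i ≠ [] := by
  obtain ⟨a, b, c, d, e⟩ := hg
  rw [pvRem]
  intro h
  have hlen := congrArg List.length h
  rw [List.length_take] at hlen
  simp only [List.length_nil] at hlen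
  omega

lemma pvRem_length (Ps : List String) (Is : List Int) (i : Int) (hg : pvGood Ps Is i) :
    (pvRem Ps Is i).length = (Is.getD i.toNat 0).toNat + 1 := by
  obtain ⟨a, b, c, d, e⟩ := hg
  rw [pvRem, List.length_take]
  omega

lemma pvLC_eq (Ps : List String) (Is : List Int) (i : Int)
    (h : (Is.getD i.toNat 0).toNat < (Ps.getD i.toNat "").toList.length) :
    pvLC Ps Is i = (Ps.getD i.toNat "").toList[(Is.getD i.toNat 0).toNat]'h := by
  rw [pvLC, pvRem, List.take_succ_eq_append_getElem h]
  rw [List.getLastD_eq_getLast?, List.getLast?_concat]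
  rfl

lemma pv_ofList_inj (a b : Char) : String.ofList [a] = String.ofList [b] ↔ a = b := by
  constructor
  · intro h
    have := congrArg String.toList h
    simpa using this
  · rintro rfl; rfl

lemma pv_ofList_ne_empty (a : Char) : String.ofList [a] ≠ "" := by
  intro h
  have := congrArg String.toList h
  simp at this

-- ---- the inner loop refines pvScan ----
lemma pvInnerA_spec (Ps : List String) : ∀ (rest : List Int) (Is : List Int) (del : List Int)
    (l : Option Char), rest.Nodup → (∀ i ∈ rest, pvGood Ps Is i) →
    (pvScan (rest.map (pvLC Ps Is)) l = none →
      pvInnerA Ps rest del (pvStrOf l) Is = some (Sum.inl "*")) ∧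
    (∀ l', pvScan (rest.map (pvLC Ps Is)) l = some l' →
      ∃ Is', pvInnerA Ps rest del (pvStrOf l) Is =
          some (Sum.inr (del ++ rest.filter (pvDelP Ps Is), pvStrOf l', Is')) ∧
        Is'.length = Is.length ∧
        (∀ k : Nat, (k : Int) ∉ rest → Is'.getD k 0 = Is.getD k 0) ∧
        (∀ i ∈ rest, pvDelP Ps Is i = false →
          pvGood Ps Is' i ∧ pvRem Ps Is' i = (pvRem Ps Is i).dropLast)) := by
  intro rest
  induction rest with
  | nil =>
    intro Is del l _ _
    constructor
    · intro h; simp [pvScan] at h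
    · intro l' h
      simp only [List.map_nil, pvScan, Option.some_inj] at h
      subst h
      exact ⟨Is, by simp [pvInnerA], rfl, fun k _ => rfl, by simp⟩
  | cons i rest ih =>
    intro Is del l hnd hg
    have hgi := hg i List.mem_cons_self
    have hgrest : ∀ j ∈ rest, pvGood Ps Is j := fun j hj => hg j (List.mem_cons_of_mem _ hj)
    have hndr : rest.Nodup := (List.nodup_cons.mp hnd).2
    have hnir : i ∉ rest := (List.nodup_cons.mp hnd).1
    obtain ⟨h0, hip, hil, hv0, hvl⟩ := hgi
    have hw : PySem.List.pyGet? Ps i = some (Ps.getD i.toNat "") := pv_pyGetD Ps "" i h0 hip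
    have hv : PySem.List.pyGet? Is i = some (Is.getD i.toNat 0) := pv_pyGetD Is 0 i h0 hil
    have hc : PySem.Str.pyGet? (Ps.getD i.toNat "") (Is.getD i.toNat 0) =
        some ((Ps.getD i.toNat "").toList[(Is.getD i.toNat 0).toNat]'hvl) := by
      rw [← pv_strGet _ _ hv0 hvl]
    have hlc : pvLC Ps Is i = (Ps.getD i.toNat "").toList[(Is.getD i.toNat 0).toNat]'hvl :=
      pvLC_eq Ps Is i hvl
    by_cases hstar : (Ps.getD i.toNat "").toList[(Is.getD i.toNat 0).toNat]'hvl = '*'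
    · -- thisLetter == "*": the index is collected for deletion
      have hdelPi : pvDelP Ps Is i = true := by
        rw [pvDelP, hlc, hstar]
        simp only [beq_self_eq_true, Bool.true_or]
      obtain ⟨ihnone, ihsome⟩ := ih Is (del ++ [i]) l hndr hgrest
      constructor
      · intro h
        simp only [List.map_cons, pvScan, hlc, if_pos hstar] at h
        simp only [pvInnerA, hw, hv, hc, if_pos hstar]
        exact ihnone h
      · intro l' h
        simp only [List.map_cons, pvScan, hlc, if_pos hstar] at h
        obtain ⟨Is', heq, hlen, hagree, hsurv⟩ := ihsome l' h
        refine ⟨Is', ?_, hlen, ?_, ?_⟩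
        · simp only [pvInnerA, hw, hv, hc, if_pos hstar]
          rw [heq, List.filter_cons_of_pos hdelPi]
          simp
        · intro k hk
          exact hagree k (fun hh => hk (List.mem_cons_of_mem _ hh))
        · intro j hj hdj
          rcases List.mem_cons.mp hj with rfl | hj
          · rw [hdelPi] at hdj; cases hdj
          · exact hsurv j hj hdj
    · -- a real letter
      have hlcne : pvLC Ps Is i ≠ '*' := by rw [hlc]; exact hstar
      have hdelPi : pvDelP Ps Is i = (Is.getD i.toNat 0 == 0) := by
        rw [pvDelP, beq_eq_false_iff_ne.mpr hlcne, Bool.false_or]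
      -- state after Is[wordIdx] -= 1
      have hset : PySem.List.pySet? Is i (Is.getD i.toNat 0 - 1) =
          some (Is.set i.toNat (Is.getD i.toNat 0 - 1)) := pv_pySet Is i _ h0 hil
      have hsetlen : (Is.set i.toNat (Is.getD i.toNat 0 - 1)).length = Is.length :=
        List.length_set ..
      have hagree₁ : ∀ j ∈ rest, (Is.set i.toNat (Is.getD i.toNat 0 - 1)).getD j.toNat 0
          = Is.getD j.toNat 0 := by
        intro j hj
        have hj0 : 0 ≤ j := (hgrest j hj).1
        have hji : j ≠ i := fun hh => hnir (hh ▸ hj)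
        exact pv_getD_set_ne Is i.toNat _ j.toNat (by omega)
      have hgrest₁ : ∀ j ∈ rest, pvGood Ps (Is.set i.toNat (Is.getD i.toNat 0 - 1)) j :=
        fun j hj => pvGood_congr Ps Is _ j (hagree₁ j hj) hsetlen (hgrest j hj)
      have hmap₁ : rest.map (pvLC Ps (Is.set i.toNat (Is.getD i.toNat 0 - 1)))
          = rest.map (pvLC Ps Is) :=
        List.map_congr_left (fun j hj => pvLC_congr Ps Is _ j (hagree₁ j hj))
      have hcont : ∀ (del₁ : List Int), del₁ = (if Is.getD i.toNat 0 - 1 < 0 then del ++ [i] else del) →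
          (pvScan (rest.map (pvLC Ps Is)) (some ((Ps.getD i.toNat "").toList[(Is.getD i.toNat 0).toNat]'hvl)) = none →
            pvInnerA Ps rest del₁
                (pvStrOf (some ((Ps.getD i.toNat "").toList[(Is.getD i.toNat 0).toNat]'hvl)))
                (Is.set i.toNat (Is.getD i.toNat 0 - 1)) = some (Sum.inl "*")) ∧
          (∀ l', pvScan (rest.map (pvLC Ps Is)) (some ((Ps.getD i.toNat "").toList[(Is.getD i.toNat 0).toNat]'hvl)) = some l' →
            ∃ Is', pvInnerA Ps rest del₁
                (pvStrOf (some ((Ps.getD i.toNat "").toList[(Is.getD i.toNat 0).toNat]'hvl)))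
                (Is.set i.toNat (Is.getD i.toNat 0 - 1)) =
                some (Sum.inr (del ++ (i :: rest).filter (pvDelP Ps Is), pvStrOf l', Is')) ∧
              Is'.length = Is.length ∧
              (∀ k : Nat, (k : Int) ∉ (i :: rest) → Is'.getD k 0 = Is.getD k 0) ∧
              (∀ j ∈ i :: rest, pvDelP Ps Is j = false →
                pvGood Ps Is' j ∧ pvRem Ps Is' j = (pvRem Ps Is j).dropLast)) := by
        intro del₁ hdel₁
        obtain ⟨ihnone, ihsome⟩ :=
          ih (Is.set i.toNat (Is.getD i.toNat 0 - 1)) del₁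
            (some ((Ps.getD i.toNat "").toList[(Is.getD i.toNat 0).toNat]'hvl)) hndr hgrest₁
        rw [hmap₁] at ihnone ihsome
        constructor
        · exact ihnone
        · intro l' h
          obtain ⟨Is', heq, hlen, hagree, hsurv⟩ := ihsome l' h
          refine ⟨Is', ?_, by rw [hlen, hsetlen], ?_, ?_⟩
          · rw [heq]
            have hfilter : rest.filter (pvDelP Ps (Is.set i.toNat (Is.getD i.toNat 0 - 1)))
                = rest.filter (pvDelP Ps Is) :=
              List.filter_congr (fun j hj => by rw [pvDelP_congr Ps Is _ j (hagree₁ j hj)])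
            rw [hfilter]
            by_cases hz : Is.getD i.toNat 0 = 0
            · have hdp : pvDelP Ps Is i = true := by
                rw [hdelPi, hz]
                simp only [beq_self_eq_true]
              rw [List.filter_cons_of_pos hdp, hdel₁, if_pos (by omega)]
              simp
            · have hdp : pvDelP Ps Is i = false := by
                rw [hdelPi]
                exact beq_eq_false_iff_ne.mpr hz
              rw [List.filter_cons_of_neg (by rw [hdp]; simp), hdel₁, if_neg (by omega)]
          · intro k hk
            have hki : (k : Int) ≠ i := fun hh => hk (hh ▸ List.mem_cons_self)
            have hkr : (k : Int) ∉ rest := fun hh => hk (List.mem_cons_of_mem _ hh)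
            rw [hagree k hkr]
            exact pv_getD_set_ne Is i.toNat _ k (by omega)
          · intro j hj hdj
            rcases List.mem_cons.mp hj with rfl | hj
            · -- the head index itself survives: its counter went down by one
              have hz : ¬ (Is.getD j.toNat 0 = 0) := by
                intro hh
                rw [hdelPi, hh] at hdj
                simp only [beq_self_eq_true] at hdj
                cases hdj
              have hjr : (j.toNat : Int) ∉ rest := by
                rw [Int.toNat_of_nonneg h0]
                exact hnir
              have hIs'j : Is'.getD j.toNat 0 = Is.getD j.toNat 0 - 1 := by
                rw [hagree j.toNat hjr]
                exact pv_getD_set_self Is j.toNat _ hil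
              constructor
              · exact ⟨h0, hip, by omega, by omega, by rw [hIs'j]; omega⟩
              · rw [pvRem, pvRem, hIs'j, List.take_succ_eq_append_getElem hvl,
                  List.dropLast_concat]
                congr 1
                omega
            · have hdj' : pvDelP Ps (Is.set i.toNat (Is.getD i.toNat 0 - 1)) j = false := by
                rw [pvDelP_congr Ps Is _ j (hagree₁ j hj)]
                exact hdj
              obtain ⟨hg', hr'⟩ := hsurv j hj hdj'
              exact ⟨hg', by rw [hr', pvRem_congr Ps Is _ j (hagree₁ j hj)]⟩
      -- dispatch on the current letter
      cases l with
      | none =>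
        have hred : pvInnerA Ps (i :: rest) del (pvStrOf none) Is
            = pvInnerA Ps rest (if Is.getD i.toNat 0 - 1 < 0 then del ++ [i] else del)
                (pvStrOf (some ((Ps.getD i.toNat "").toList[(Is.getD i.toNat 0).toNat]'hvl)))
                (Is.set i.toNat (Is.getD i.toNat 0 - 1)) := by
          simp only [pvInnerA, hw, hv, hc, if_neg hstar, pvStrOf, hset]
          simp
        have hscan : pvScan ((i :: rest).map (pvLC Ps Is)) none
            = pvScan (rest.map (pvLC Ps Is))
                (some ((Ps.getD i.toNat "").toList[(Is.getD i.toNat 0).toNat]'hvl)) := by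
          simp only [List.map_cons, pvScan, hlc, if_neg hstar]
        obtain ⟨cnone, csome⟩ := hcont _ rfl
        exact ⟨fun h => by rw [hred]; exact cnone (by rw [← hscan]; exact h),
          fun l' h => by rw [hred]; exact csome l' (by rw [← hscan]; exact h)⟩
      | some l₀ =>
        by_cases hcl : (Ps.getD i.toNat "").toList[(Is.getD i.toNat 0).toNat]'hvl = l₀
        · have hred : pvInnerA Ps (i :: rest) del (pvStrOf (some l₀)) Is
              = pvInnerA Ps rest (if Is.getD i.toNat 0 - 1 < 0 then del ++ [i] else del)
                  (pvStrOf (some ((Ps.getD i.toNat "").toList[(Is.getD i.toNat 0).toNat]'hvl)))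
                  (Is.set i.toNat (Is.getD i.toNat 0 - 1)) := by
            simp only [pvInnerA, hw, hv, hc, if_neg hstar, pvStrOf, hset]
            rw [if_neg (fun hh => hh.2 (by rw [hcl])), if_neg (pv_ofList_ne_empty l₀)]
            rw [hcl]
          have hl₀ : l₀ ≠ '*' := by rw [← hcl]; exact hstar
          have hscan : pvScan ((i :: rest).map (pvLC Ps Is)) (some l₀)
              = pvScan (rest.map (pvLC Ps Is))
                  (some ((Ps.getD i.toNat "").toList[(Is.getD i.toNat 0).toNat]'hvl)) := by
            simp only [List.map_cons, pvScan, hlc, hcl, if_neg hl₀]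
            simp
          obtain ⟨cnone, csome⟩ := hcont _ rfl
          exact ⟨fun h => by rw [hred]; exact cnone (by rw [← hscan]; exact h),
            fun l' h => by rw [hred]; exact csome l' (by rw [← hscan]; exact h)⟩
        · -- conflicting letter: return "*"
          have hscan : pvScan ((i :: rest).map (pvLC Ps Is)) (some l₀) = none := by
            simp only [List.map_cons, pvScan, hlc, if_neg hstar, if_neg hcl]
          have hport : pvInnerA Ps (i :: rest) del (pvStrOf (some l₀)) Is
              = some (Sum.inl "*") := by
            simp only [pvInnerA, hw, hv, hc, if_neg hstar, pvStrOf]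
            rw [if_pos ⟨pv_ofList_ne_empty l₀, fun hh => hcl (((pv_ofList_inj l₀ _).mp hh)).symm⟩]
          constructor
          · intro _; exact hport
          · intro l' h
            rw [hscan] at h
            cases h

-- "".join(parts) is the concatenation of the parts
lemma pv_intercalate_nil (l : List (List Char)) : List.intercalate [] l = l.flatten := by
  induction l with
  | nil => rfl
  | cons a t ih =>
    cases t with
    | nil => simp [List.intercalate]
    | cons b t' =>
      simp only [List.intercalate, List.intersperse] at *
      simpa using ih

lemma pv_join_flatten (parts : List String) :
    PySem.Str.join "" parts = String.ofList ((parts.map String.toList).flatten) := by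
  simp [PySem.Str.join, PySem.Chars.join, pv_intercalate_nil]

-- each surviving word is one shorter, so the total size of the active fragments drops
lemma pv_sum_filter_le (act : List Int) (f g : Int → Nat) (p : Int → Bool)
    (hf : ∀ i ∈ act, 1 ≤ f i) (hfg : ∀ i ∈ act, p i = false → g i + 1 = f i) :
    ((act.filter (fun i => !(p i))).map g).sum + act.length ≤ (act.map f).sum := by
  induction act with
  | nil => simp
  | cons a t ih =>
    have hfa := hf a List.mem_cons_self
    have iht := ih (fun i hi => hf i (List.mem_cons_of_mem _ hi))
      (fun i hi hp => hfg i (List.mem_cons_of_mem _ hi) hp)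
    by_cases hpa : p a
    · rw [List.filter_cons_of_neg (by simp [hpa])]
      simp only [List.map_cons, List.sum_cons, List.length_cons]
      omega
    · rw [List.filter_cons_of_pos (by simp [hpa])]
      have hga := hfg a List.mem_cons_self (by simpa using hpa)
      simp only [List.map_cons, List.sum_cons, List.length_cons]
      omega

-- ---- the outer loop computes pvBVal ----
lemma pvOuterA_spec (Ps : List String) : ∀ (fuel : Nat) (act : List Int) (Is : List Int)
    (common : List String), act.Nodup → (∀ i ∈ act, pvGood Ps Is i) →
    pvMeasure Ps Is act < fuel →
    pvOuterA Ps fuel act Is common =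
      some (match pvBVal (act.map (pvRem Ps Is)) with
        | none => "*"
        | some L => String.ofList (L ++ (common.reverse.map String.toList).flatten)) := by
  intro fuel
  induction fuel with
  | zero => intro act Is common _ _ hf; omega
  | succ f ihf =>
    intro act Is common hnd hg hf
    by_cases hact : act = []
    · subst hact
      simp only [pvOuterA]
      have hbv : pvBVal ([] : List (List Char)) = some [] := by
        simp [pvBVal, pvCompat, pvLongest]
      simp only [List.map_nil, hbv, pv_join_flatten, List.nil_append]
      rfl
    · simp only [pvOuterA, if_neg hact]
      rw [show ("" : String) = pvStrOf none from rfl]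
      obtain ⟨innone, insome⟩ := pvInnerA_spec Ps act Is [] none hnd hg
      have hnets : ∀ t ∈ act.map (pvRem Ps Is), t ≠ [] := by
        intro t ht
        obtain ⟨i, hi, rfl⟩ := List.mem_map.mp ht
        exact pvRem_ne_nil Ps Is i (hg i hi)
      cases hscan : pvScan (act.map (pvLC Ps Is)) none with
      | none =>
        rw [innone hscan]
        simp only []
        obtain ⟨c, hcm, d, hdm, hc1, hd1, hcd⟩ := pvScan_none_none _ hscan
        obtain ⟨i₁, hi₁, hlc₁⟩ := List.mem_map.mp hcm
        obtain ⟨i₂, hi₂, hlc₂⟩ := List.mem_map.mp hdm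
        have hbv := pvBVal_conflict (act.map (pvRem Ps Is)) (pvRem Ps Is i₁) (pvRem Ps Is i₂)
          (List.mem_map_of_mem hi₁) (List.mem_map_of_mem hi₂) hnets
          (by rw [← pvLC]; rw [hlc₁]; exact hc1)
          (by rw [← pvLC]; rw [hlc₂]; exact hd1)
          (by rw [← pvLC, ← pvLC, hlc₁, hlc₂]; exact hcd)
        rw [hbv]
      | some l' =>
        obtain ⟨Is', heq, hlen, hagree, hsurv⟩ := insome l' hscan
        simp only [List.nil_append] at heq
        simp only [heq, pvRemoveAll_filter act (pvDelP Ps Is) hnd]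
        have hact'good : ∀ i ∈ act.filter (fun i => !(pvDelP Ps Is i)), pvGood Ps Is' i := by
          intro i hi
          obtain ⟨hia, hip⟩ := List.mem_filter.mp hi
          exact (hsurv i hia (by simpa using hip)).1
        have hact'rem : ∀ i ∈ act.filter (fun i => !(pvDelP Ps Is i)),
            pvRem Ps Is' i = (pvRem Ps Is i).dropLast := by
          intro i hi
          obtain ⟨hia, hip⟩ := List.mem_filter.mp hi
          exact (hsurv i hia (by simpa using hip)).2
        have hmeas : pvMeasure Ps Is' (act.filter (fun i => !(pvDelP Ps Is i))) < f := by
          have h1 : pvMeasure Ps Is' (act.filter (fun i => !(pvDelP Ps Is i)))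
              = ((act.filter (fun i => !(pvDelP Ps Is i))).map
                  (fun i => (pvRem Ps Is i).length - 1)).sum := by
            rw [pvMeasure]
            congr 1
            refine List.map_congr_left (fun i hi => ?_)
            rw [hact'rem i hi, List.length_dropLast]
          have h2 := pv_sum_filter_le act (fun i => (pvRem Ps Is i).length)
            (fun i => (pvRem Ps Is i).length - 1) (pvDelP Ps Is)
            (fun i hi => by
              show 1 ≤ (pvRem Ps Is i).length
              rw [pvRem_length Ps Is i (hg i hi)]
              omega)
            (fun i hi hp => by
              show (pvRem Ps Is i).length - 1 + 1 = (pvRem Ps Is i).length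
              rw [pvRem_length Ps Is i (hg i hi)]
              omega)
          have hlen0 : 0 < act.length :=
            Nat.pos_of_ne_zero (fun h0 => hact (List.eq_nil_of_length_eq_zero h0))
          rw [pvMeasure] at hf
          rw [h1]
          omega
        rw [ihf _ Is' (common ++ [pvStrOf l']) (hnd.filter _) hact'good hmeas]
        -- now compare the two sides of the specification
        rcases pvScan_none_some _ _ hscan with ⟨hl'0, hallstar⟩ | ⟨c, hl'c, hcstar, hcmem, hall⟩
        · subst hl'0
          have hstar : ∀ t ∈ act.map (pvRem Ps Is), t.getLastD ' ' = '*' := by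
            intro t ht
            obtain ⟨i, hi, rfl⟩ := List.mem_map.mp ht
            exact hallstar _ (List.mem_map_of_mem hi)
          have hbv := pvBVal_allstar (act.map (pvRem Ps Is)) hnets hstar
          have hempty : act.filter (fun i => !(pvDelP Ps Is i)) = [] := by
            rw [List.filter_eq_nil_iff]
            intro i hi
            have : pvDelP Ps Is i = true := by
              rw [pvDelP]
              have : pvLC Ps Is i = '*' := hallstar _ (List.mem_map_of_mem hi)
              rw [this]
              simp
            simp [this]
          rw [hempty, hbv]
          have hbv0 : pvBVal ([] : List (List Char)) = some [] := by
            simp [pvBVal, pvCompat, pvLongest]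
          simp only [List.map_nil, hbv0, pvStrOf]
          simp
        · subst hl'c
          have hc : ∀ t ∈ act.map (pvRem Ps Is), t.getLastD ' ' = '*' ∨ t.getLastD ' ' = c := by
            intro t ht
            obtain ⟨i, hi, rfl⟩ := List.mem_map.mp ht
            exact hall _ (List.mem_map_of_mem hi)
          have hex : ∃ t ∈ act.map (pvRem Ps Is), t.getLastD ' ' ≠ '*' := by
            obtain ⟨i, hi, hlci⟩ := List.mem_map.mp hcmem
            exact ⟨pvRem Ps Is i, List.mem_map_of_mem hi, by rw [← pvLC, hlci]; exact hcstar⟩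
          rw [pvBVal_round (act.map (pvRem Ps Is)) c hcstar hnets hc hex]
          have hts' : (act.filter (fun i => !(pvDelP Ps Is i))).map (pvRem Ps Is')
              = ((act.map (pvRem Ps Is)).filter
                  (fun t => !((t.getLastD ' ' == '*') || (t.length == 1)))).map List.dropLast := by
            rw [List.filter_map, List.map_map]
            have h1 : (act.filter (fun i => !(pvDelP Ps Is i))).map (pvRem Ps Is')
                = (act.filter (fun i => !(pvDelP Ps Is i))).map
                    (fun i => (pvRem Ps Is i).dropLast) := List.map_congr_left hact'rem
            have h2 : act.filter (fun i => !(pvDelP Ps Is i))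
                = act.filter ((fun t => !((t.getLastD ' ' == '*') || (t.length == 1)))
                    ∘ pvRem Ps Is) := by
              refine List.filter_congr (fun i hi => ?_)
              have hq : ((pvRem Ps Is i).getLastD ' ' == '*') = (pvLC Ps Is i == '*') := rfl
              have hlen1 : (pvRem Ps Is i).length = (Is.getD i.toNat 0).toNat + 1 :=
                pvRem_length Ps Is i (hg i hi)
              have hz0 : 0 ≤ Is.getD i.toNat 0 := (hg i hi).2.2.2.1
              have hbeq : (Is.getD i.toNat 0 == 0) = ((Is.getD i.toNat 0).toNat + 1 == 1) := by
                by_cases hz : Is.getD i.toNat 0 = 0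
                · rw [hz]; rfl
                · have h1 : (Is.getD i.toNat 0).toNat + 1 ≠ 1 := by omega
                  rw [beq_eq_false_iff_ne.mpr hz, beq_eq_false_iff_ne.mpr h1]
              simp only [Function.comp, pvDelP, hq, hlen1, hbeq]
            rw [h1, h2]
            rfl
          rw [← hts']
          cases hbv : pvBVal ((act.filter (fun i => !(pvDelP Ps Is i))).map (pvRem Ps Is')) with
          | none => simp
          | some L' =>
            simp only [Option.map_some]
            have hflat : ((common ++ [pvStrOf (some c)]).reverse.map String.toList).flatten
                = [c] ++ (common.reverse.map String.toList).flatten := by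
              simp [pvStrOf]
            rw [hflat]
            simp

-- partial sums of word lengths are bounded by the total
lemma pv_range_sum (Ps : List String) : ∀ n : Nat, n ≤ Ps.length →
    ((List.range n).map (fun k => (Ps.getD k "").toList.length)).sum
      ≤ (Ps.map (fun w => w.toList.length)).sum := by
  induction Ps with
  | nil =>
    intro n hn
    have hn0 : n = 0 := by simpa using hn
    subst hn0
    simp
  | cons p ps ih =>
    intro n hn
    cases n with
    | zero => simp
    | succ m =>
      rw [List.range_succ_eq_map, List.map_cons, List.map_map]
      have hcomp : ((fun k => (((p :: ps).getD k "").toList.length)) ∘ (fun i => i + 1))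
          = (fun k => ((ps.getD k "").toList.length)) := by
        funext k
        simp
      rw [hcomp]
      simp only [List.sum_cons, List.getD_cons_zero, List.map_cons]
      have := ih m (by simpa using hn)
      omega

-- ===== VERDICT (by name: the statement is the Claim_ definition above) =====
theorem findCommonString_spec : Claim_equal_findCommonString := by
  intro N Ps _ hpre
  obtain ⟨hNlen, hnem⟩ := hpre
  rw [Spec_findCommonString]
  have hNlen' : N ≤ (Ps.length : Int) := by simpa [PySem.List.len_eq] using hNlen
  have hmem_range : ∀ i ∈ PySem.List.pyRange 0 N 1, 0 ≤ i ∧ i < N := by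
    intro i hi
    exact (PySem.List.mem_pyRange_one.mp hi)
  have hword : ∀ i ∈ PySem.List.pyRange 0 N 1,
      Ps.getD i.toNat "" ≠ "" ∧ i.toNat < Ps.length := by
    intro i hi
    obtain ⟨h0, hiN⟩ := hmem_range i hi
    have hk : i.toNat < Ps.length := by omega
    have hkN : i.toNat < N.toNat := by omega
    have hgd : Ps.getD i.toNat "" = Ps[i.toNat]'hk := by
      rw [List.getD_eq_getElem?_getD]
      simp [List.getElem?_eq_getElem hk]
    have hlt : i.toNat < (Ps.take N.toNat).length := by
      simp only [List.length_take]
      omega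
    have he : (Ps.take N.toNat)[i.toNat]'hlt = Ps[i.toNat]'hk := List.getElem_take
    refine ⟨?_, hk⟩
    rw [hgd, ← he]
    exact hnem _ (List.getElem_mem hlt)
  have hgetIs : ∀ i : Int, i.toNat < Ps.length →
      (Ps.map (fun w => PySem.Str.len w - 1)).getD i.toNat 0
        = ((Ps.getD i.toNat "").toList.length : Int) - 1 := by
    intro i hk
    rw [List.getD_eq_getElem?_getD, List.getElem?_map]
    rw [List.getD_eq_getElem?_getD]
    simp [List.getElem?_eq_getElem hk, PySem.Str.len]
  have hgood : ∀ i ∈ PySem.List.pyRange 0 N 1,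
      pvGood Ps (Ps.map (fun w => PySem.Str.len w - 1)) i := by
    intro i hi
    obtain ⟨h0, hiN⟩ := hmem_range i hi
    obtain ⟨hne, hk⟩ := hword i hi
    have hl1 : 1 ≤ (Ps.getD i.toNat "").toList.length := by
      have : (Ps.getD i.toNat "").toList ≠ [] :=
        fun hh => hne (String.toList_eq_nil_iff.mp hh)
      have := List.length_pos_iff.mpr this
      omega
    refine ⟨h0, hk, by simpa using hk, ?_, ?_⟩
    · rw [hgetIs i hk]; omega
    · rw [hgetIs i hk]; omega
  have hrem : ∀ i ∈ PySem.List.pyRange 0 N 1,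
      pvRem Ps (Ps.map (fun w => PySem.Str.len w - 1)) i = (Ps.getD i.toNat "").toList := by
    intro i hi
    obtain ⟨hne, hk⟩ := hword i hi
    have hl1 : 1 ≤ (Ps.getD i.toNat "").toList.length := by
      have : (Ps.getD i.toNat "").toList ≠ [] :=
        fun hh => hne (String.toList_eq_nil_iff.mp hh)
      have := List.length_pos_iff.mpr this
      omega
    rw [pvRem, hgetIs i hk]
    have : (((Ps.getD i.toNat "").toList.length : Int) - 1).toNat + 1
        = (Ps.getD i.toNat "").toList.length := by omega
    rw [this, List.take_length]
  have hmeas : pvMeasure Ps (Ps.map (fun w => PySem.Str.len w - 1)) (PySem.List.pyRange 0 N 1)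
      < (Ps.map (fun w => w.toList.length)).sum + 2 := by
    by_cases hN0 : N ≤ 0
    · rw [pvMeasure, PySem.List.pyRange_one_eq_nil hN0]
      simp
    · have hm : pvMeasure Ps (Ps.map (fun w => PySem.Str.len w - 1)) (PySem.List.pyRange 0 N 1)
          = ((List.range N.toNat).map (fun k => (Ps.getD k "").toList.length)).sum := by
        rw [pvMeasure, PySem.List.pyRange_one]
        simp only [sub_zero, List.map_map]
        congr 1
        refine List.map_congr_left (fun k hk => ?_)
        have hkN : k < N.toNat := by
          have := List.mem_range.mp hk
          omega
        have hmem : ((0 : Int) + (k : Int)) ∈ PySem.List.pyRange 0 N 1 := by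
          rw [PySem.List.mem_pyRange_one]
          omega
        simp only [Function.comp]
        rw [hrem _ hmem]
        simp
      rw [hm]
      have := pv_range_sum Ps N.toNat (by omega)
      omega
  have houter := pvOuterA_spec Ps ((Ps.map (fun w => w.toList.length)).sum + 2)
    (PySem.List.pyRange 0 N 1) (Ps.map (fun w => PySem.Str.len w - 1)) []
    (PySem.List.nodup_pyRange_one 0 N) hgood hmeas
  -- the two sides as values of pvBVal on the initial fragments
  have hsfx : ((PySem.List.pyRange 0 N 1).map
        (fun i => String.ofList (pvSuffix ((PySem.List.pyGet? Ps i).getD "").toList)))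
      = (PySem.List.pyRange 0 N 1).map
        (fun i => String.ofList (pvSuffix (pvRem Ps (Ps.map (fun w => PySem.Str.len w - 1)) i))) := by
    refine List.map_congr_left (fun i hi => ?_)
    obtain ⟨h0, _⟩ := hmem_range i hi
    obtain ⟨_, hk⟩ := hword i hi
    rw [pv_pyGetD Ps "" i h0 hk, Option.getD_some, hrem i hi]
  simp only [findCommonString, findCommonString_alt]
  rw [houter, Option.getD_some, hsfx]
  set S := (PySem.List.pyRange 0 N 1).map
      (fun i => String.ofList (pvSuffix (pvRem Ps (Ps.map (fun w => PySem.Str.len w - 1)) i)))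
    with hS
  set ts₀ := (PySem.List.pyRange 0 N 1).map (pvRem Ps (Ps.map (fun w => PySem.Str.len w - 1)))
    with hts₀
  have htolist : S.map String.toList = ts₀.map pvSuffix := by
    rw [hS, hts₀]
    simp [List.map_map, Function.comp]
  have hbest : (PySem.List.maxD S PySem.Str.len "").toList = pvLongest (ts₀.map pvSuffix) := by
    rw [pv_maxD_toList, htolist]
  have hALL : (S.all (fun s => PySem.Str.endswith (PySem.List.maxD S PySem.Str.len "") s)) = true
      ↔ pvCompat (ts₀.map pvSuffix) := by
    rw [List.all_eq_true, pvCompat_iff_allSuffix]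
    constructor
    · intro h u hu
      rw [← htolist] at hu
      obtain ⟨s, hs, rfl⟩ := List.mem_map.mp hu
      have h1 := h s hs
      rw [PySem.Str.endswith] at h1
      have h2 := (PySem.Chars.endswith_iff _ _).mp h1
      rw [hbest] at h2
      exact h2
    · intro h s hs
      rw [PySem.Str.endswith, PySem.Chars.endswith_iff, hbest]
      refine h s.toList ?_
      rw [← htolist]
      exact List.mem_map_of_mem hs
  by_cases hcp : pvCompat (ts₀.map pvSuffix)
  · have hbv : pvBVal ts₀ = some (pvLongest (ts₀.map pvSuffix)) := pvBVal_pos ts₀ hcp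
    rw [hbv, if_pos (hALL.mpr hcp)]
    simp only [List.reverse_nil, List.map_nil, List.flatten_nil, List.append_nil]
    rw [← hbest, String.ofList_toList]
  · have hbv : pvBVal ts₀ = none := pvBVal_neg ts₀ hcp
    rw [hbv, if_neg (fun h => hcp (hALL.mp h))]
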